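-- pv_equiv track=rewrite | github.com/jburnford/Canada-History-Knowledge-Graph | scripts/fix_ocr_errors.py | find_consensus_name
-- ===== SOURCE A (Python) =====
-- from collections import Counter, defaultdict
-- from typing import Dict, List, Tuple, Set
--
-- def find_consensus_name(names: List[str]) -> Tuple[str, int]:
--     """
--     Find the most common name in a list (consensus name).
--
--     Returns:
--         (consensus_name, count)
--     """
--     if not names:
--         return None, 0
--
--     # Normalize: strip whitespace, lowercase for comparison
--     normalized = [n.strip().lower() for n in names if n and n != "UNKNOWN"]
--
--     if not normalized:
--         return None, 0
--
--     counter = Counter(normalized)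
--     consensus_normalized, count = counter.most_common(1)[0]
--
--     # Find original casing
--     for name in names:
--         if name.strip().lower() == consensus_normalized:
--             return name, count
--
--     return consensus_normalized, count
-- ===== SOURCE B (Python) =====
-- def find_consensus_name(names):
--     """
--     Find the most common name by sorting the normalized names and scanning
--     runs of equal keys (sort-then-scan instead of hash counting).
--     """
--     filtered = [n.strip().lower() for n in names if n and n != "UNKNOWN"]
--     if not filtered:
--         return None, 0
--
--     pairs = sorted([(k, i) for i, k in enumerate(filtered)], key=lambda p: p[0])
--
--     # group the sorted pairs into runs of one key: (key, count, min index)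
--     runs = []
--     for k, i in pairs:
--         if runs and runs[-1][0] == k:
--             runs[-1] = (k, runs[-1][1] + 1, min(runs[-1][2], i))
--         else:
--             runs.append((k, 1, i))
--
--     # best run: greatest count, ties broken by earliest first occurrence
--     best = runs[0]
--     for r in runs:
--         if r[1] > best[1] or (r[1] == best[1] and r[2] < best[2]):
--             best = r
--
--     key, count, _ = best
--     for name in names:
--         if name.strip().lower() == key:
--             return name, count
--     return key, count
-- ===== Notes on version B (the rewrite author's own statement) =====
-- stated objective: alternative
-- what changed: Replaces Counter-based hash counting plus most_common by sort-then-scan: the normalized names are paired with their positions, sorted by key, grouped into contiguous runs, and the best run (greatest count, ties by earliest first occurrence, matching Counter.most_common's insertion-order tie-break) is selected.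
import Mathlib
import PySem

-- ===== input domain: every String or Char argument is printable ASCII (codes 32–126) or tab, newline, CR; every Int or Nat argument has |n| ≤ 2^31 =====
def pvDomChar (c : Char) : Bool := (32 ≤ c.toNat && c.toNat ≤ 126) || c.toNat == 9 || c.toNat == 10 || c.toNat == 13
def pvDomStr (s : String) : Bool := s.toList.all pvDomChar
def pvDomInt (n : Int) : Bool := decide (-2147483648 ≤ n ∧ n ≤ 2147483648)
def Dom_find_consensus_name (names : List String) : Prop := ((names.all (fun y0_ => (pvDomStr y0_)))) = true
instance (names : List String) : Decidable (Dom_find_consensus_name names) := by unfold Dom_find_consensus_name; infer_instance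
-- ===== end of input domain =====

-- B replaces Counter-based hash counting + most_common by sort-then-scan over runs (objective: alternative).

-- shared helper: n.strip().lower()
def pvKey (n : String) : String := PySem.Str.lower (PySem.Str.strip n)

-- ===== PORT A =====
def find_consensus_name (names : List String) : Option String × Int :=
  if names = [] then (none, 0)
  else
    -- normalized = [n.strip().lower() for n in names if n and n != "UNKNOWN"]
    let normalized := (names.filter (fun n => n != "" && n != "UNKNOWN")).map pvKey
    if normalized = [] then (none, 0)
    else
      let counter : PySem.Dict String Int := PySem.Dict.counter normalized
      -- counter.most_common(1)[0]: stable sort of the items by count, descending, take the head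
      match PySem.List.sorted counter.items (fun kv => kv.2) true with
      | [] => (none, 0)  -- unreachable (counter nonempty)
      | (consensus_normalized, count) :: _ =>
        -- for name in names: if name.strip().lower() == consensus_normalized: return name, count
        match names.find? (fun name => pvKey name == consensus_normalized) with
        | some name => (some name, count)
        | none => (some consensus_normalized, count)

-- ===== PORT B =====
-- runs[-1]-update / append step of B's grouping loop (a run is (key, count, min index))
def pvRunStep (runs : List (String × Int × Int)) (p : String × Int) : List (String × Int × Int) :=
  match runs.getLast? with
  | some r => if r.1 == p.1 then runs.dropLast ++ [(p.1, r.2.1 + 1, min r.2.2 p.2)]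
              else runs ++ [(p.1, 1, p.2)]
  | none => [(p.1, 1, p.2)]

-- best-run selection step: greater count wins; on equal counts the smaller first index
def pvBestStep (best r : String × Int × Int) : String × Int × Int :=
  if best.2.1 < r.2.1 || (r.2.1 == best.2.1 && r.2.2 < best.2.2) then r else best

def find_consensus_name_alt (names : List String) : Option String × Int :=
  let filtered := (names.filter (fun n => n != "" && n != "UNKNOWN")).map pvKey
  if filtered = [] then (none, 0)
  else
    -- pairs = sorted([(k, i) for i, k in enumerate(filtered)], key=lambda p: p[0])
    let pairs := PySem.List.sorted ((PySem.List.enumerate filtered).map (fun p => (p.2, p.1))) (fun p => p.1) false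
    let runs := pairs.foldl pvRunStep []
    match runs with
    | [] => (none, 0)  -- unreachable (pairs is nonempty)
    | r0 :: _ =>
      let best := runs.foldl pvBestStep r0
      match names.find? (fun name => pvKey name == best.1) with
      | some name => (some name, best.2.1)
      | none => (some best.1, best.2.1)

-- ===== PRECONDITION & SPEC =====
def Spec_find_consensus_name (names : List String) (out : Option String × Int) : Prop := out = find_consensus_name_alt names
instance (names : List String) (out : Option String × Int) : Decidable (Spec_find_consensus_name names out) := by unfold Spec_find_consensus_name; infer_instance

-- ===== CLAIM (what is proved, stated in full; the proofs are below) =====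
def Claim_equal_find_consensus_name : Prop := ∀ (names : List String), Dom_find_consensus_name names → Spec_find_consensus_name names (find_consensus_name names)

-- ===== LEMMAS AND PROOFS =====

-- ---- A-side: head of the descending stable sort = running first-strict-max ----

theorem head?_insertBy (x : String × Int) (ys : List (String × Int)) :
    (PySem.List.insertBy (fun a b => decide (b.2 < a.2)) x ys).head?
      = some (match ys.head? with
              | none => x
              | some m => if m.2 < x.2 then x else m) := by
  cases ys with
  | nil => simp [PySem.List.insertBy]
  | cons y ys =>
    by_cases h : y.2 < x.2 <;> simp [PySem.List.insertBy, h]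

theorem head?_insertByFold (l : List (String × Int)) (acc : List (String × Int)) :
    (l.foldl (fun acc x => PySem.List.insertBy (fun a b => decide (b.2 < a.2)) x acc) acc).head?
      = l.foldl (fun h x => some (match h with
                                  | none => x
                                  | some m => if m.2 < x.2 then x else m)) acc.head? := by
  induction l generalizing acc with
  | nil => rfl
  | cons x xs ih =>
    simp only [List.foldl_cons, ih, head?_insertBy]

theorem optFold_eq_seeded (l : List (String × Int)) (m0 : String × Int) :
    l.foldl (fun h x => some (match h with
                              | none => x
                              | some m => if m.2 < x.2 then x else m)) (some m0)
      = some (l.foldl (fun m x => if m.2 < x.2 then x else m) m0) := by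
  induction l generalizing m0 with
  | nil => rfl
  | cons x xs ih => simp only [List.foldl_cons]; exact ih _


theorem fmfold_spec (R : (String × Int) → (String × Int) → Prop)
    (htrans : ∀ {a b c}, R a b → R b c → R a c) :
    ∀ (l : List (String × Int)) (m0 : String × Int),
    l.Pairwise R → (∀ y ∈ l, R m0 y) →
    (l.foldl (fun m x => if m.2 < x.2 then x else m) m0 = m0
      ∨ l.foldl (fun m x => if m.2 < x.2 then x else m) m0 ∈ l)
    ∧ ∀ y, (y = m0 ∨ y ∈ l) →
        y.2 ≤ (l.foldl (fun m x => if m.2 < x.2 then x else m) m0).2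
        ∧ (y.2 = (l.foldl (fun m x => if m.2 < x.2 then x else m) m0).2 →
            y = l.foldl (fun m x => if m.2 < x.2 then x else m) m0
            ∨ R (l.foldl (fun m x => if m.2 < x.2 then x else m) m0) y) := by
  intro l
  induction l with
  | nil =>
    intro m0 _ _
    refine ⟨Or.inl rfl, ?_⟩
    intro y hy
    rcases hy with h | h
    · subst h; exact ⟨le_refl _, fun _ => Or.inl rfl⟩
    · simp at h
  | cons x t ih =>
    intro m0 hpw h0
    rw [List.foldl_cons]
    obtain ⟨hx, hpwt⟩ := List.pairwise_cons.mp hpw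
    set m1 := if m0.2 < x.2 then x else m0 with hm1
    have hm1or : m1 = x ∨ m1 = m0 := by rw [hm1]; split <;> simp
    have h0' : ∀ y ∈ t, R m1 y := by
      intro y hy
      rcases hm1or with h | h
      · rw [h]; exact hx y hy
      · rw [h]; exact h0 y (List.mem_cons_of_mem _ hy)
    obtain ⟨hmem, hdom⟩ := ih m1 hpwt h0'
    set res := t.foldl (fun m x => if m.2 < x.2 then x else m) m1 with hres
    have hm1res := hdom m1 (Or.inl rfl)
    constructor
    · rcases hmem with h | h
      · rw [h]
        rcases hm1or with h' | h'
        · right; rw [h']; exact List.mem_cons_self ..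
        · left; exact h'
      · right; exact List.mem_cons_of_mem _ h
    · intro y hy
      rcases hy with h | h
      · -- y = m0
        by_cases hc : m0.2 < x.2
        · -- m1 = x, y strictly below
          have hm1x : m1 = x := by rw [hm1, if_pos hc]
          have h2 : y.2 < m1.2 := by rw [h, hm1x]; exact hc
          have hle : y.2 ≤ res.2 := le_trans (le_of_lt h2) hm1res.1
          exact ⟨hle, fun hteq => absurd hteq (by omega)⟩
        · have hm1y : m1 = m0 := by rw [hm1, if_neg hc]
          rw [h, ← hm1y]
          exact hdom m1 (Or.inl rfl)
      · rcases List.mem_cons.mp h with h' | h'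
        · -- y = x
          have hR : R m0 x := h0 x (List.mem_cons_self ..)
          by_cases hc : m0.2 < x.2
          · have hm1x : m1 = x := by rw [hm1, if_pos hc]
            rw [h', ← hm1x]
            exact hdom m1 (Or.inl rfl)
          · have hm1y : m1 = m0 := by rw [hm1, if_neg hc]
            have hy2 : y.2 ≤ m1.2 := by rw [h', hm1y]; omega
            have hle : y.2 ≤ res.2 := le_trans hy2 hm1res.1
            refine ⟨hle, ?_⟩
            intro hteq
            have hm1tie : m1.2 = res.2 := by omega
            rcases hm1res.2 hm1tie with he | hr
            · -- res = m1 = m0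
              right
              rw [← he, hm1y, h']
              exact hR
            · -- R res m1 = R res m0, and R m0 x
              right
              have hRm1 : R m1 x := by rw [hm1y]; exact hR
              rw [h']
              exact htrans hr hRm1
        · exact hdom y (Or.inr h')

-- ---- first-occurrence order ----


theorem idxOf_le_of_getElem {L : List String} {k : String} :
    ∀ (j : Nat) (h : j < L.length), L[j] = k → L.idxOf k ≤ j := by
  induction L with
  | nil => intro j h; simp at h
  | cons x t ih =>
    intro j h he
    rw [List.idxOf_cons]
    cases hx : (x == k) with
    | true => simp
    | false =>
      cases j with
      | zero => simp at he; subst he; simp at hx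
      | succ j' =>
        simp only [cond_false]
        have := ih j' (by simpa using h) (by simpa using he)
        omega

theorem ofList_pairwise_idxOf (L : List String) :
    (PySem.Set.ofList L).Pairwise (fun a b => L.idxOf a < L.idxOf b) := by
  induction L with
  | nil => simp [PySem.Set.ofList]
  | cons x t ih =>
    rw [PySem.Set.ofList_cons]
    constructor
    · intro b hb
      have hbx : b ≠ x := ((PySem.Set.mem_discard _ _ _).mp hb).2
      rw [List.idxOf_cons, List.idxOf_cons]
      have hxx : (x == x) = true := by simp
      have hxb : (x == b) = false := by simp [Ne.symm hbx]
      simp [hxb]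
    · have hsub : ((PySem.Set.ofList t).discard x).Sublist (PySem.Set.ofList t) := by
        simp only [PySem.Set.discard]
        exact List.filter_sublist
      have hpw := ih.sublist hsub
      refine hpw.imp_of_mem ?_
      intro a b ha hb hab
      have hax : a ≠ x := ((PySem.Set.mem_discard _ _ _).mp ha).2
      have hbx : b ≠ x := ((PySem.Set.mem_discard _ _ _).mp hb).2
      rw [List.idxOf_cons, List.idxOf_cons]
      have h1 : (x == a) = false := by simp [Ne.symm hax]
      have h2 : (x == b) = false := by simp [Ne.symm hbx]
      simp [h1, h2]
      omega

-- ---- B-side loop lemmas ----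

def pvMerge (r : String × Int × Int) : List (String × Int) → List (String × Int × Int)
  | [] => [r]
  | p :: t => if r.1 == p.1 then pvMerge (p.1, r.2.1 + 1, min r.2.2 p.2) t
              else r :: pvMerge (p.1, 1, p.2) t

theorem foldl_runStep (S : List (String × Int)) :
    ∀ (acc : List (String × Int × Int)) (r : String × Int × Int),
    S.foldl pvRunStep (acc ++ [r]) = acc ++ pvMerge r S := by
  induction S with
  | nil => intro acc r; rfl
  | cons p t ih =>
    intro acc r
    rw [List.foldl_cons]
    show t.foldl pvRunStep (pvRunStep (acc ++ [r]) p) = _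
    rw [pvRunStep, List.getLast?_concat]
    by_cases h : (r.1 == p.1) = true
    · simp only [h, if_true, List.dropLast_concat]
      rw [ih acc (p.1, r.2.1 + 1, min r.2.2 p.2), pvMerge, if_pos h]
    · simp only [h, Bool.false_eq_true, if_false]
      have hh := ih (acc ++ [r]) (p.1, 1, p.2)
      rw [hh, pvMerge, if_neg h]
      simp

theorem countP_enumerate (L : List String) (k : String) :
    ∀ s : Int, ((PySem.List.enumerate L s).countP (fun p => p.2 == k)) = L.count k := by
  induction L with
  | nil => intro s; rfl
  | cons x t ih =>
    intro s
    rw [PySem.List.enumerate_cons, List.countP_cons, ih, List.count_cons]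

theorem pvBestStep_dom_left (b x : String × Int × Int) :
    b.2.1 < (pvBestStep b x).2.1 ∨ (b.2.1 = (pvBestStep b x).2.1 ∧ (pvBestStep b x).2.2 ≤ b.2.2) := by
  rw [pvBestStep]
  by_cases h : (b.2.1 < x.2.1 || (x.2.1 == b.2.1 && x.2.2 < b.2.2)) = true
  · rw [if_pos h]; simp at h; omega
  · rw [if_neg h]; omega

theorem pvBestStep_dom_right (b x : String × Int × Int) :
    x.2.1 < (pvBestStep b x).2.1 ∨ (x.2.1 = (pvBestStep b x).2.1 ∧ (pvBestStep b x).2.2 ≤ x.2.2) := by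
  rw [pvBestStep]
  by_cases h : (b.2.1 < x.2.1 || (x.2.1 == b.2.1 && x.2.2 < b.2.2)) = true
  · rw [if_pos h]; omega
  · rw [if_neg h]; simp at h; omega

theorem bestFold_spec (Rs : List (String × Int × Int)) :
    ∀ (b0 : String × Int × Int),
    (Rs.foldl pvBestStep b0 = b0 ∨ Rs.foldl pvBestStep b0 ∈ Rs)
    ∧ ∀ r, (r = b0 ∨ r ∈ Rs) →
        r.2.1 < (Rs.foldl pvBestStep b0).2.1
        ∨ (r.2.1 = (Rs.foldl pvBestStep b0).2.1 ∧ (Rs.foldl pvBestStep b0).2.2 ≤ r.2.2) := by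
  induction Rs with
  | nil =>
    intro b0
    refine ⟨Or.inl rfl, ?_⟩
    intro r hr
    rcases hr with h | h
    · subst h; right; exact ⟨rfl, le_refl _⟩
    · simp at h
  | cons x t ih =>
    intro b0
    rw [List.foldl_cons]
    obtain ⟨hmem, hdom⟩ := ih (pvBestStep b0 x)
    have hbx : pvBestStep b0 x = b0 ∨ pvBestStep b0 x = x := by
      rw [pvBestStep]; split <;> simp
    constructor
    · rcases hmem with h | h
      · rw [h]; rcases hbx with h' | h'
        · exact Or.inl h'
        · right; rw [h']; exact List.mem_cons_self ..
      · exact Or.inr (List.mem_cons_of_mem _ h)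
    · intro r hr
      have hstep := hdom (pvBestStep b0 x) (Or.inl rfl)
      rcases hr with h | h
      · -- r = b0
        subst h
        have h1 := pvBestStep_dom_left r x
        omega
      · rcases List.mem_cons.mp h with h' | h'
        · subst h'
          have h1 := pvBestStep_dom_right b0 r
          omega
        · exact hdom r (Or.inr h')

theorem pvMerge_spec :
    ∀ (S : List (String × Int)), S.Pairwise (fun a b => a.1 ≤ b.1) →
    ∀ (r : String × Int × Int), (∀ p ∈ S, r.1 ≤ p.1) →
    (∀ r' ∈ pvMerge r S,
        (r'.1 = r.1 ∧ r'.2.1 = r.2.1 + (S.countP (fun p => p.1 == r.1) : Int)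
          ∧ r'.2.2 = ((S.filter (fun p => p.1 == r.1)).map (·.2)).foldl min r.2.2)
      ∨ (r'.1 ≠ r.1 ∧ r'.1 ∈ S.map (·.1)
          ∧ r'.2.1 = (S.countP (fun p => p.1 == r'.1) : Int)
          ∧ ∃ a t, (S.filter (fun p => p.1 == r'.1)).map (·.2) = a :: t ∧ r'.2.2 = t.foldl min a))
    ∧ (∀ k, (k = r.1 ∨ k ∈ S.map (·.1)) → ∃ r' ∈ pvMerge r S, r'.1 = k) := by
  intro S
  induction S with
  | nil =>
    intro _ r _
    constructor
    · intro r' hr'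
      simp only [pvMerge, List.mem_singleton] at hr'
      subst hr'
      left
      refine ⟨rfl, by simp, by simp⟩
    · intro k hk
      rcases hk with h | h
      · exact ⟨r, by simp [pvMerge], h.symm ▸ rfl⟩
      · simp at h
  | cons p t ih =>
    intro hpw r hle
    obtain ⟨hp, hpwt⟩ := List.pairwise_cons.mp hpw
    by_cases heq : (r.1 == p.1) = true
    · have heq' : r.1 = p.1 := eq_of_beq heq
      rw [pvMerge, if_pos heq]
      obtain ⟨IH1, IH2⟩ := ih hpwt (p.1, r.2.1 + 1, min r.2.2 p.2) hp
      dsimp only at IH1 IH2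
      constructor
      · intro r' hr'
        rcases IH1 r' hr' with ⟨hk, hc, hm⟩ | ⟨hk, hmem, hc, a, tl, hfil, hm⟩
        · left
          refine ⟨by rw [hk, heq'], ?_, ?_⟩
          · simp only [heq', List.countP_cons, hc]
            simp
            ring
          · simp only [heq', List.filter_cons]
            simp only [beq_self_eq_true, if_true, List.map_cons, List.foldl_cons, hm]
        · right
          have hk' : r'.1 ≠ r.1 := by rw [heq']; exact hk
          have hpf : (p.1 == r'.1) = false := by simp; exact fun h => hk h.symm
          refine ⟨hk', List.mem_cons_of_mem _ hmem, ?_, ?_⟩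
          · simp only [List.countP_cons, hc, hpf]
            simp
          · simp only [List.filter_cons, hpf, Bool.false_eq_true, if_false]
            exact ⟨a, tl, hfil, hm⟩
      · intro k hk
        rcases hk with h | h
        · exact IH2 k (Or.inl (by rw [h, heq']))
        · rw [List.map_cons] at h
          rcases List.mem_cons.mp h with h' | h'
          · exact IH2 k (Or.inl h')
          · exact IH2 k (Or.inr h')
    · have hne : r.1 ≠ p.1 := by simpa using heq
      have hlt : r.1 < p.1 := lt_of_le_of_ne (hle p (List.mem_cons_self ..)) hne
      have habs : ∀ q ∈ p :: t, r.1 < q.1 := by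
        intro q hq
        rcases List.mem_cons.mp hq with h' | h'
        · rw [h']; exact hlt
        · exact lt_of_lt_of_le hlt (hp q h')
      have hc0 : (p :: t).countP (fun q => q.1 == r.1) = 0 := by
        rw [List.countP_eq_zero]
        intro q hq
        simp
        exact fun h => absurd h (ne_of_gt (habs q hq))
      have hf0 : (p :: t).filter (fun q => q.1 == r.1) = [] := by
        rw [List.filter_eq_nil_iff]
        intro q hq
        simp
        exact fun h => absurd h (ne_of_gt (habs q hq))
      rw [pvMerge, if_neg heq]
      obtain ⟨IH1, IH2⟩ := ih hpwt (p.1, 1, p.2) hp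
      dsimp only at IH1 IH2
      constructor
      · intro r' hr'
        rcases List.mem_cons.mp hr' with h' | h'
        · left
          subst h'
          refine ⟨rfl, by rw [hc0]; simp, by rw [hf0]; simp⟩
        · right
          rcases IH1 r' h' with ⟨hk, hc, hm⟩ | ⟨hk, hmem, hc, a, tl, hfil, hm⟩
          · -- run for p's key
            have hkp : r'.1 = p.1 := hk
            refine ⟨by rw [hkp]; exact Ne.symm (ne_of_lt hlt), by simp [hkp], ?_, ?_⟩
            · simp only [hkp, List.countP_cons, hc]
              simp
              ring
            · have hpt : (p.1 == r'.1) = true := by simp [hkp]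
              rw [List.filter_cons, if_pos hpt, List.map_cons]
              refine ⟨p.2, (t.filter (fun q => q.1 == r'.1)).map (·.2), rfl, ?_⟩
              rw [hm]
              simp [hkp]
          · -- run for a later key
            have hkr : r'.1 ≠ r.1 := by
              obtain ⟨q, hq, hq1⟩ := List.mem_map.mp hmem
              have := habs q (List.mem_cons_of_mem _ hq)
              rw [hq1] at this
              exact Ne.symm (ne_of_lt this)
            have hpf : (p.1 == r'.1) = false := by simp; exact fun h => hk h.symm
            refine ⟨hkr, List.mem_cons_of_mem _ hmem, ?_, ?_⟩
            · rw [hc, List.countP_cons]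
              simp only [hpf]
              push_cast
              ring
            · rw [List.filter_cons, if_neg (by simp [hpf])]
              exact ⟨a, tl, hfil, hm⟩
      · intro k hk
        rcases hk with h | h
        · exact ⟨r, List.mem_cons_self .., h.symm ▸ rfl⟩
        · rw [List.map_cons] at h
          rcases List.mem_cons.mp h with h' | h'
          · obtain ⟨r', hr', hr1⟩ := IH2 k (Or.inl h')
            exact ⟨r', List.mem_cons_of_mem _ hr', hr1⟩
          · obtain ⟨r', hr', hr1⟩ := IH2 k (Or.inr h')
            exact ⟨r', List.mem_cons_of_mem _ hr', hr1⟩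


-- ===== VERDICT (by name: the statement is the Claim_ definition above) =====
theorem find_consensus_name_spec : Claim_equal_find_consensus_name := by
  intro names _
  show find_consensus_name names = find_consensus_name_alt names
  unfold find_consensus_name find_consensus_name_alt
  by_cases hnil : names = []
  · subst hnil; simp
  · simp only [hnil, if_false]
    set L := (names.filter (fun n => n != "" && n != "UNKNOWN")).map pvKey with hLdef
    by_cases hemp : L = []
    · simp [hemp]
    · simp only [hemp, if_false]
      obtain ⟨x0, L', hL'⟩ : ∃ x0 L', L = x0 :: L' := by
        cases hLc : L with
        | nil => exact absurd hLc hemp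
        | cons a b => exact ⟨a, b, rfl⟩
      -- ===== A side =====
      have hitems : (PySem.Dict.counter L).items
          = (PySem.Set.ofList L).map (fun k => (k, (L.count k : Int))) := PySem.Dict.items_counter L
      have hx0D : x0 ∈ PySem.Set.ofList L :=
        (PySem.Set.mem_ofList L x0).mpr (by rw [hL']; exact List.mem_cons_self ..)
      have hitemsne : (PySem.Dict.counter L).items ≠ [] := by
        rw [hitems]
        intro h
        rw [List.map_eq_nil_iff] at h
        rw [h] at hx0D
        simp at hx0D
      obtain ⟨i0, irest, hit⟩ : ∃ i0 irest, (PySem.Dict.counter L).items = i0 :: irest := by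
        cases hic : (PySem.Dict.counter L).items with
        | nil => exact absurd hic hitemsne
        | cons a b => exact ⟨a, b, rfl⟩
      have hpwItems : ((PySem.Dict.counter L).items).Pairwise
          (fun a b => L.idxOf a.1 < L.idxOf b.1) := by
        rw [hitems]
        exact List.pairwise_map.mpr (ofList_pairwise_idxOf L)
      have hheadA : (PySem.List.sorted (PySem.Dict.counter L).items (fun kv => kv.2) true).head?
          = some (irest.foldl (fun m x => if m.2 < x.2 then x else m) i0) := by
        rw [PySem.List.sorted_rev_eq_foldl_insertBy, head?_insertByFold, hit]
        rw [List.foldl_cons]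
        exact optFold_eq_seeded irest i0
      have hpwI := hit ▸ hpwItems
      obtain ⟨h0I, hpwIrest⟩ := List.pairwise_cons.mp hpwI
      obtain ⟨hmemA, hdomA⟩ := fmfold_spec (fun a b => L.idxOf a.1 < L.idxOf b.1)
        (fun hab hbc => lt_trans hab hbc) irest i0 hpwIrest h0I
      set mA := irest.foldl (fun m x => if m.2 < x.2 then x else m) i0 with hmAdef
      have hmA_items : mA ∈ (PySem.Dict.counter L).items := by
        rw [hit]
        rcases hmemA with h | h
        · rw [h]; exact List.mem_cons_self ..
        · exact List.mem_cons_of_mem _ h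
      obtain ⟨kA, hkAD, hmAeq⟩ := List.mem_map.mp (hitems ▸ hmA_items)
      have hkAL : kA ∈ L := (PySem.Set.mem_ofList L kA).mp hkAD
      have hdomA' : ∀ k' ∈ L, (L.count k' : Int) ≤ mA.2
          ∧ ((L.count k' : Int) = mA.2 → L.idxOf mA.1 ≤ L.idxOf k') := by
        intro k' hk'
        have hky : (k', (L.count k' : Int)) ∈ (PySem.Dict.counter L).items := by
          rw [hitems]
          exact List.mem_map.mpr ⟨k', (PySem.Set.mem_ofList L k').mpr hk', rfl⟩
        rw [hit] at hky
        have hd := hdomA (k', (L.count k' : Int)) (List.mem_cons.mp hky)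
        refine ⟨hd.1, ?_⟩
        intro hteq
        rcases hd.2 hteq with h | h
        · rw [← h]
        · exact le_of_lt h
      -- ===== B side =====
      set P := (PySem.List.enumerate L).map (fun p => (p.2, p.1)) with hPdef
      have hPne : P ≠ [] := by
        rw [hPdef, hL']
        simp [PySem.List.enumerate_cons]
      obtain ⟨p0, rest, hS⟩ : ∃ p0 rest,
          PySem.List.sorted P (fun p => p.1) false = p0 :: rest := by
        cases hsc : PySem.List.sorted P (fun p => p.1) false with
        | nil => exact absurd ((PySem.List.sorted_eq_nil_iff ..).mp hsc) hPne
        | cons a b => exact ⟨a, b, rfl⟩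
      have hS0perm : (p0 :: rest).Perm P := hS ▸ PySem.List.sorted_perm P (fun p => p.1) false
      have hpwS : (p0 :: rest).Pairwise (fun a b => a.1 ≤ b.1) :=
        hS ▸ PySem.List.sorted_pairwise P (fun p => p.1)
      obtain ⟨hp0, hpwrest⟩ := List.pairwise_cons.mp hpwS
      have hruns : (p0 :: rest).foldl pvRunStep [] = pvMerge (p0.1, 1, p0.2) rest := by
        rw [List.foldl_cons]
        have h1 : pvRunStep [] p0 = [] ++ [(p0.1, 1, p0.2)] := rfl
        rw [h1, foldl_runStep]
        simp
      obtain ⟨hMruns, hMcover⟩ := pvMerge_spec rest hpwrest (p0.1, 1, p0.2) hp0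
      dsimp only at hMruns hMcover
      -- unified per-run facts over the whole sorted list
      have hrunfacts : ∀ r' ∈ pvMerge (p0.1, 1, p0.2) rest,
          r'.1 ∈ (p0 :: rest).map (·.1)
          ∧ r'.2.1 = (((p0 :: rest).countP (fun q => q.1 == r'.1)) : Int)
          ∧ ∃ a tl, ((p0 :: rest).filter (fun q => q.1 == r'.1)).map (·.2) = a :: tl
              ∧ r'.2.2 = tl.foldl min a := by
        intro r' hr'
        rcases hMruns r' hr' with ⟨hk, hc, hm⟩ | ⟨hk, hmem, hc, a, tl, hfil, hm⟩
        · refine ⟨by rw [hk]; simp, ?_, ?_⟩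
          · simp only [hk, List.countP_cons, hc]
            simp
            ring
          · have hpt : (p0.1 == r'.1) = true := by simp [hk]
            rw [List.filter_cons, if_pos hpt, List.map_cons]
            refine ⟨p0.2, (rest.filter (fun q => q.1 == r'.1)).map (·.2), rfl, ?_⟩
            rw [hm]
            simp [hk]
        · have hpf : (p0.1 == r'.1) = false := by simp; exact fun h => hk h.symm
          refine ⟨by simp; right; simpa using hmem, ?_, ?_⟩
          · rw [hc, List.countP_cons]
            simp only [hpf]
            simp
          · rw [List.filter_cons, if_neg (by simp [hpf])]
            exact ⟨a, tl, hfil, hm⟩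
      -- transfer to the original list L
      have hmapfstP : P.map (·.1) = L := by
        rw [hPdef, List.map_map]
        exact PySem.List.map_snd_enumerate L 0
      have hkeyL : ∀ k : String, k ∈ (p0 :: rest).map (·.1) ↔ k ∈ L := by
        intro k
        rw [← hmapfstP]
        exact (hS0perm.map (·.1)).mem_iff
      have hcntL : ∀ k : String, ((p0 :: rest).countP (fun q => q.1 == k)) = L.count k := by
        intro k
        rw [hS0perm.countP_eq, hPdef, List.countP_map]
        exact countP_enumerate L k 0
      have hminL : ∀ k : String, k ∈ L → ∀ (a : Int) (tl : List Int),
          ((p0 :: rest).filter (fun q => q.1 == k)).map (·.2) = a :: tl →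
          tl.foldl min a = (L.idxOf k : Int) := by
        intro k hk a tl hfl
        have hpermI : (((p0 :: rest).filter (fun q => q.1 == k)).map (·.2)).Perm
            ((P.filter (fun q => q.1 == k)).map (·.2)) := (hS0perm.filter _).map _
        have hmemI : ∀ y : Int, y ∈ (P.filter (fun q => q.1 == k)).map (·.2)
            ↔ ∃ (j : Nat) (_ : j < L.length), L[j]? = some k ∧ y = (j : Int) := by
          intro y
          constructor
          · intro hy
            obtain ⟨q, hq, rfl⟩ := List.mem_map.mp hy
            obtain ⟨hqP, hqk⟩ := List.mem_filter.mp hq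
            rw [hPdef] at hqP
            obtain ⟨e, heP, rfl⟩ := List.mem_map.mp hqP
            obtain ⟨j, hj, rfl⟩ := (PySem.List.mem_enumerate_iff L 0 e).mp heP
            refine ⟨j, hj, ?_, by simp⟩
            have : L[j] = k := by simpa using hqk
            simp [List.getElem?_eq_getElem hj, this]
          · rintro ⟨j, hj, hLj, rfl⟩
            have hLj' : L[j] = k := by
              rw [List.getElem?_eq_getElem hj] at hLj
              simpa using hLj
            refine List.mem_map.mpr ⟨(k, (j : Int)), ?_, rfl⟩
            refine List.mem_filter.mpr ⟨?_, by simp⟩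
            rw [hPdef]
            refine List.mem_map.mpr ⟨((j : Int), k), ?_, rfl⟩
            exact (PySem.List.mem_enumerate_iff L 0 _).mpr ⟨j, hj, by simp [hLj']⟩
        have hmmem : tl.foldl min a ∈ a :: tl := by
          rcases PySem.List.foldl_min_mem tl a with h | h
          · rw [h]; exact List.mem_cons_self ..
          · exact List.mem_cons_of_mem _ h
        have hmle : ∀ y ∈ a :: tl, tl.foldl min a ≤ y := by
          intro y hy
          rcases List.mem_cons.mp hy with h | h
          · rw [h]; exact (PySem.List.foldl_min_le tl a).1
          · exact (PySem.List.foldl_min_le tl a).2 y h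
        have hmembridge : ∀ y : Int, y ∈ a :: tl ↔ y ∈ (P.filter (fun q => q.1 == k)).map (·.2) := by
          intro y
          rw [← hfl]
          exact hpermI.mem_iff
        have hidx_lt : L.idxOf k < L.length := List.idxOf_lt_length_iff.mpr hk
        have hidx_get : L[L.idxOf k]? = some k := by
          rw [List.getElem?_eq_getElem hidx_lt]
          simp [List.getElem_idxOf hidx_lt]
        have hidx_in : ((L.idxOf k : Nat) : Int) ∈ a :: tl :=
          (hmembridge _).mpr ((hmemI _).mpr ⟨L.idxOf k, hidx_lt, hidx_get, rfl⟩)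
        have h2 : tl.foldl min a ≤ (L.idxOf k : Int) := hmle _ hidx_in
        obtain ⟨j, hj, hLj, hmj⟩ := (hmemI _).mp ((hmembridge _).mp hmmem)
        have hLj' : L[j] = k := by
          rw [List.getElem?_eq_getElem hj] at hLj
          simpa using hLj
        have h3 : L.idxOf k ≤ j := idxOf_le_of_getElem j hj hLj'
        omega
      -- destructure the runs list and the best fold
      obtain ⟨r0, rrest, hr⟩ : ∃ r0 rrest, pvMerge (p0.1, 1, p0.2) rest = r0 :: rrest := by
        cases hrc : pvMerge (p0.1, 1, p0.2) rest with
        | nil =>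
          obtain ⟨r', hr', _⟩ := hMcover p0.1 (Or.inl rfl)
          rw [hrc] at hr'
          simp at hr'
        | cons a b => exact ⟨a, b, rfl⟩
      obtain ⟨hbmem, hbdom⟩ := bestFold_spec (r0 :: rrest) r0
      have hbest_runs : (r0 :: rrest).foldl pvBestStep r0 ∈ pvMerge (p0.1, 1, p0.2) rest := by
        rw [hr]
        rcases hbmem with h | h
        · rw [h]; exact List.mem_cons_self ..
        · exact h
      set best := (r0 :: rrest).foldl pvBestStep r0 with hbestdef
      obtain ⟨hbkey, hbcnt, a, tl, hfl, hbmin⟩ := hrunfacts best hbest_runs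
      have hbkeyL : best.1 ∈ L := (hkeyL best.1).mp hbkey
      have hbcnt' : best.2.1 = (L.count best.1 : Int) := by rw [hbcnt, hcntL]
      have hbmin' : best.2.2 = (L.idxOf best.1 : Int) := by
        rw [hbmin]
        exact hminL best.1 hbkeyL a tl hfl
      have hdomB' : ∀ k' ∈ L, (L.count k' : Int) < (L.count best.1 : Int)
          ∨ ((L.count k' : Int) = (L.count best.1 : Int) ∧ L.idxOf best.1 ≤ L.idxOf k') := by
        intro k' hk'
        have hk'keys : k' ∈ (p0 :: rest).map (·.1) := (hkeyL k').mpr hk'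
        have hcover : k' = p0.1 ∨ k' ∈ rest.map (·.1) := by
          rw [List.map_cons] at hk'keys
          exact List.mem_cons.mp hk'keys
        obtain ⟨r', hr', hr'k⟩ := hMcover k' hcover
        obtain ⟨_, hr'cnt, a', tl', hfl', hr'min⟩ := hrunfacts r' hr'
        have hr'cnt' : r'.2.1 = (L.count k' : Int) := by rw [hr'cnt, hr'k, hcntL]
        have hr'min' : r'.2.2 = (L.idxOf k' : Int) := by
          rw [hr'min, hr'k] at *
          exact hminL k' hk' a' tl' hfl'
        have hr2 := hr'
        rw [hr] at hr2
        have hd := hbdom r' (Or.inr hr2)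
        rw [hr'cnt', hr'min', hbcnt', hbmin'] at hd
        rcases hd with h | ⟨h1, h2⟩
        · exact Or.inl h
        · right
          exact ⟨h1, by exact_mod_cast h2⟩
      -- ===== uniqueness: the two chosen keys coincide =====
      have hmA2 : mA.2 = (L.count kA : Int) := by rw [← hmAeq]
      have hmA1 : mA.1 = kA := by rw [← hmAeq]
      have hcnteq : (L.count kA : Int) = (L.count best.1 : Int) := by
        have h1 := (hdomA' best.1 hbkeyL).1
        have h2 := hdomB' kA hkAL
        rw [hmA2] at h1
        rcases h2 with h | ⟨h, _⟩ <;> omega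
      have hidxeq : L.idxOf kA = L.idxOf best.1 := by
        have h1 := (hdomA' best.1 hbkeyL).2 (by rw [hmA2]; exact hcnteq.symm)
        rw [hmA1] at h1
        have h2 := hdomB' kA hkAL
        rcases h2 with h | ⟨_, h⟩
        · omega
        · omega
      have hkeq : kA = best.1 := by
        have h1 : L.idxOf kA < L.length := List.idxOf_lt_length_iff.mpr hkAL
        have h2 : L.idxOf best.1 < L.length := List.idxOf_lt_length_iff.mpr hbkeyL
        have e1 : L[L.idxOf kA] = kA := List.getElem_idxOf h1
        have e2 : L[L.idxOf best.1] = best.1 := List.getElem_idxOf h2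
        rw [← e1, ← e2]
        simp only [hidxeq]
      -- ===== both sides compute the same match =====
      obtain ⟨mh, mt, hs⟩ : ∃ mh mt,
          PySem.List.sorted (PySem.Dict.counter L).items (fun kv => kv.2) true = mh :: mt := by
        cases hsc : PySem.List.sorted (PySem.Dict.counter L).items (fun kv => kv.2) true with
        | nil => exact absurd ((PySem.List.sorted_eq_nil_iff ..).mp hsc) hitemsne
        | cons a b => exact ⟨a, b, rfl⟩
      have hmh : mh = mA := by
        rw [hs] at hheadA
        simpa using hheadA
      rw [hs, hS, hruns, hr]
      obtain ⟨c1, c2⟩ := mh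
      have hc1 : c1 = kA := by
        have := congrArg Prod.fst hmh
        simpa [hmA1] using this
      have hc2 : c2 = (L.count kA : Int) := by
        have := congrArg Prod.snd hmh
        simpa [hmA2] using this
      rw [hc1, hc2, hkeq]
      dsimp only
      rw [hbcnt']
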